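-- pv_equiv track=rewrite | github.com/ydb-platform/ydb | contrib/python/proto-schema-parser/proto_schema_parser/parser.py | normalize_option_name
-- ===== SOURCE A (Python) =====
-- def normalize_option_name(s: str):
--     # Remove all spaces
--     s = s.replace(" ", "")
--
--     # If the name starts with '(', find the matching ')'
--     if s.startswith("("):
--         depth = 0
--         for i, c in enumerate(s):
--             if c == "(":
--                 depth += 1
--             elif c == ")":
--                 depth -= 1
--                 if depth == 0:
--                     break
--         else:
--             # No matching ')'
--             raise ValueError("No matching closing parenthesis")
--         # Extract content inside the outermost parentheses
--         inside = s[1:i]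
--         rest = s[i + 1 :]
--         # Remove any nested parentheses inside 'inside'
--         inside = inside.replace("(", "").replace(")", "")
--         # Rebuild the normalized option name
--         option_name = f"({inside}){rest}"
--     else:
--         # If no starting '(', the option name is s
--         option_name = s
--     return option_name
-- ===== SOURCE B (Python) =====
-- def normalize_option_name(s: str):
--     # Single accumulating pass: after stripping spaces, if s starts with '(',
--     # walk once with a depth counter, collecting non-paren chars into `inside`
--     # until depth returns to 0, then collect the remainder verbatim into `rest`.
--     s = s.replace(" ", "")
--     if not s.startswith("("):
--         return s
--     depth = 0
--     closed = False
--     inside = []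
--     rest = []
--     for c in s:
--         if closed:
--             rest.append(c)
--         elif c == "(":
--             depth += 1
--         elif c == ")":
--             depth -= 1
--             if depth == 0:
--                 closed = True
--         else:
--             inside.append(c)
--     if not closed:
--         raise ValueError("No matching closing parenthesis")
--     return "(" + "".join(inside) + ")" + "".join(rest)
-- ===== Notes on version B (the rewrite author's own statement) =====
-- stated objective: alternative
-- what changed: Replaces A's find-the-matching-index-then-slice-then-two-replace-passes shape with a single accumulating traversal that maintains a depth counter and builds the inside and rest buffers in one pass.
-- outside the precondition, e.g. on normalize_option_name('(abc'): A raises ValueError, B raises ValueError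
import Mathlib
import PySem

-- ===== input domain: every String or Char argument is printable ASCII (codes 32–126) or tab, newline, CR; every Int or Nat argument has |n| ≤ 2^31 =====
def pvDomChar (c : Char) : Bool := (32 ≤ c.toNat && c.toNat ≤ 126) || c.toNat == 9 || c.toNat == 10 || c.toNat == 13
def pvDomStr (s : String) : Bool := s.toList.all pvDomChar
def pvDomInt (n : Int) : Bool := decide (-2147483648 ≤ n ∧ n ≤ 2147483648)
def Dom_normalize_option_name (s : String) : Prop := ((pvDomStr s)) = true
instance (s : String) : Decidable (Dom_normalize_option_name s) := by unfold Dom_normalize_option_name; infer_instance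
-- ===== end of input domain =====

-- B replaces A's find-index/slice/two-replace shape with a single accumulating depth-counting pass; alternative decomposition, same cost.

-- ===== PORT A =====
-- 'for i, c in enumerate(s): …' searching for the index where depth returns to 0;
-- none = the loop's else-branch (Python raises ValueError there).
def pvAFind : List Char → Int → Nat → Option Nat
  | [], _, _ => none
  | c :: cs, depth, i =>
    if c = '(' then pvAFind cs (depth + 1) (i + 1)
    else if c = ')' then
      let d := depth - 1
      if d = 0 then some i else pvAFind cs d (i + 1)
    else pvAFind cs depth (i + 1)

def normalize_option_name (s : String) : String :=
  -- s = s.replace(" ", "")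
  let t := PySem.Str.replace s " " ""
  -- if s.startswith("("):
  if PySem.Str.startswith t "(" then
    match pvAFind t.toList 0 0 with
    | none => ""   -- Python raises ValueError here; excluded by Pre_
    | some i =>
      -- inside = s[1:i]; rest = s[i+1:]
      let inside := PySem.List.slice t.toList (some 1) (some (Int.ofNat i))
      let rest := PySem.List.slice t.toList (some (Int.ofNat (i + 1))) none
      -- inside = inside.replace("(", "").replace(")", "")
      let inside2 := PySem.Chars.replace (PySem.Chars.replace inside ['('] []) [')'] []
      -- f"({inside}){rest}"
      String.ofList ('(' :: inside2 ++ ')' :: rest)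
  else t

-- ===== PORT B =====
-- One pass: depth counter; non-paren chars accumulate into `inside` until depth
-- returns to 0, after which the remaining characters are the verbatim `rest`.
-- none = `closed` stayed False (ValueError in Source B).
def pvBScan : List Char → Int → List Char → Option (List Char × List Char)
  | [], _, _ => none
  | c :: cs, depth, inside =>
    if c = '(' then pvBScan cs (depth + 1) inside
    else if c = ')' then
      let d := depth - 1
      if d = 0 then some (inside, cs) else pvBScan cs d inside
    else pvBScan cs depth (inside ++ [c])

def normalize_option_name_alt (s : String) : String :=
  let t := PySem.Str.replace s " " ""
  if PySem.Str.startswith t "(" then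
    match pvBScan t.toList 0 [] with
    | none => ""   -- ValueError in Source B; excluded by Pre_
    | some (inside, rest) => String.ofList ('(' :: inside ++ ')' :: rest)
  else t

-- ===== PRECONDITION & SPEC =====
-- Pre_ excludes exactly the inputs on which Python A raises ValueError (Source B raises there
-- too): after removing spaces the string starts with '(' but the parenthesis balance of no
-- prefix returns to zero.
def Pre_normalize_option_name (s : String) : Prop :=
  let t := (PySem.Str.replace s " " "").toList
  PySem.Chars.startswith t ['('] = true →
    ∃ i < t.length, (t.take (i + 1)).count '(' = (t.take (i + 1)).count ')'
instance (s : String) : Decidable (Pre_normalize_option_name s) := by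
  unfold Pre_normalize_option_name; infer_instance

def pvWitness_normalize_option_name : String := "(a.b).c"

def Spec_normalize_option_name (s : String) (out : String) : Prop := out = normalize_option_name_alt s
instance (s : String) (out : String) : Decidable (Spec_normalize_option_name s out) := by unfold Spec_normalize_option_name; infer_instance

-- ===== CLAIM (what is proved, stated in full; the proofs are below) =====
def Claim_equal_normalize_option_name : Prop := ∀ (s : String), Dom_normalize_option_name s → Pre_normalize_option_name s → Spec_normalize_option_name s (normalize_option_name s)

-- ===== LEMMAS AND PROOFS =====

-- character class kept by A's two inner replaces / accumulated by B's inside buffer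
def pvNonParen (c : Char) : Bool := c ≠ '(' && c ≠ ')'

-- replace with a single-char pattern and empty replacement is filtering that char out
theorem replace_go_single (c : Char) :
    ∀ (fuel : Nat) (l acc : List Char),
      PySem.Chars.replace.go [c] [] fuel l acc =
        acc.reverse ++ (l.take fuel).filter (· ≠ c) ++ l.drop fuel := by
  intro fuel
  induction fuel with
  | zero => intro l acc; simp [PySem.Chars.replace.go]
  | succ n ih =>
    intro l acc
    cases l with
    | nil => simp [PySem.Chars.replace.go]
    | cons a t =>
      rw [PySem.Chars.replace.go]
      by_cases h : a = c
      · subst h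
        simp [List.isPrefixOf, ih]
      · have : ¬ ([c].isPrefixOf (a :: t) = true) := by
          simp [List.isPrefixOf]; exact fun hh => (h hh.symm).elim
        simp only [this]
        simp [ih, h]

theorem replace_single (c : Char) (l : List Char) :
    PySem.Chars.replace l [c] [] = l.filter (· ≠ c) := by
  simp [PySem.Chars.replace, replace_go_single]

-- the core correspondence between A's index search and B's accumulating scan
theorem find_scan (l : List Char) : ∀ (d : Int) (i : Nat) (acc : List Char),
    (pvAFind l d i = none → pvBScan l d acc = none) ∧
    (∀ j, pvAFind l d i = some j →
      i ≤ j ∧ pvBScan l d acc =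
        some (acc ++ (l.take (j - i)).filter pvNonParen, l.drop (j - i + 1))) := by
  induction l with
  | nil => intro d i acc; simp [pvAFind, pvBScan]
  | cons c cs ih =>
    intro d i acc
    by_cases h1 : c = '('
    · subst h1
      simp only [pvAFind, pvBScan, reduceIte]
      refine ⟨fun h => (ih (d+1) (i+1) acc).1 h, fun j hj => ?_⟩
      obtain ⟨hle, hb⟩ := (ih (d+1) (i+1) acc).2 j hj
      refine ⟨by omega, ?_⟩
      rw [hb]
      have h2 : j - i = (j - (i+1)) + 1 := by omega
      have h3 : j - i + 1 = (j - (i+1) + 1) + 1 := by omega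
      simp [h2, pvNonParen]
    · by_cases h2 : c = ')'
      · subst h2
        simp only [pvAFind, pvBScan, reduceIte]
        by_cases h3 : d - 1 = 0
        · rw [if_pos h3, if_pos h3]
          refine ⟨fun h => by simp at h, fun j hj => ?_⟩
          have hj' : i = j := by simpa using hj
          subst hj'
          simp
        · rw [if_neg h3, if_neg h3]
          refine ⟨fun h => (ih (d-1) (i+1) acc).1 h, fun j hj => ?_⟩
          obtain ⟨hle, hb⟩ := (ih (d-1) (i+1) acc).2 j hj
          refine ⟨by omega, ?_⟩
          rw [hb]
          have h4 : j - i = (j - (i+1)) + 1 := by omega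
          have h5 : j - i + 1 = (j - (i+1) + 1) + 1 := by omega
          simp [h4, pvNonParen]
      · simp only [pvAFind, pvBScan, if_neg h1, if_neg h2]
        refine ⟨fun h => (ih d (i+1) (acc ++ [c])).1 h, fun j hj => ?_⟩
        obtain ⟨hle, hb⟩ := (ih d (i+1) (acc ++ [c])).2 j hj
        refine ⟨by omega, ?_⟩
        rw [hb]
        have h4 : j - i = (j - (i+1)) + 1 := by omega
        have h5 : j - i + 1 = (j - (i+1) + 1) + 1 := by omega
        simp [h4, pvNonParen, h1, h2]

-- A's two replace passes compose to one pvNonParen filter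
theorem filter_nonparen (l : List Char) :
    (l.filter (· ≠ '(')).filter (· ≠ ')') = l.filter pvNonParen := by
  rw [List.filter_filter]
  apply List.filter_congr
  intro a _
  simp [pvNonParen, Bool.and_comm]

-- ===== VERDICT (by name: the statement is the Claim_ definition above) =====
theorem normalize_option_name_spec : Claim_equal_normalize_option_name := by
  intro s _ _
  unfold Spec_normalize_option_name normalize_option_name normalize_option_name_alt
  simp only [PySem.Str.startswith_eq]
  set t := PySem.Str.replace s " " "" with ht
  by_cases hs : PySem.Chars.startswith t.toList "(".toList = true
  · rw [if_pos hs, if_pos hs]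
    cases hfind : pvAFind t.toList 0 0 with
    | none =>
      have := (find_scan t.toList 0 0 []).1 hfind
      rw [this]
    | some j =>
      obtain ⟨hle, hb⟩ := (find_scan t.toList 0 0 []).2 j hfind
      rw [hb]
      dsimp only
      obtain ⟨b, hl⟩ : ∃ b, t.toList = '(' :: b := by
        rw [PySem.Chars.startswith] at hs
        cases hl : t.toList with
        | nil => rw [hl] at hs; simp at hs
        | cons a b' =>
          rw [hl] at hs
          have : '(' = a ∧ [].isPrefixOf b' = true := by
            simpa [List.isPrefixOf] using hs
          exact ⟨b', by rw [← this.1]⟩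
      have hslice1 : PySem.List.slice t.toList (some 1) (some (Int.ofNat j)) =
          (t.toList.drop 1).take (j - 1) := by
        have := PySem.List.slice_natCast t.toList 1 j
        simpa [Int.ofNat_eq_natCast] using this
      have hslice2 : PySem.List.slice t.toList (some (Int.ofNat (j + 1))) none =
          t.toList.drop (j + 1) := by
        have h0 : (0:Int) ≤ Int.ofNat (j + 1) := by
          rw [Int.ofNat_eq_natCast]; exact Int.natCast_nonneg _
        have := PySem.List.slice_from t.toList h0
        simpa using this
      rw [hslice1, hslice2, replace_single, replace_single, hl]
      cases j with
      | zero => simp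
      | succ k =>
        simp only [Nat.add_sub_cancel, Nat.sub_zero, List.drop_succ_cons,
          List.take_succ_cons, List.nil_append, List.filter_cons]
        rw [filter_nonparen]
        simp [pvNonParen]
  · rw [if_neg hs, if_neg hs]
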